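-- pv_equiv track=rewrite | github.com/AndresBayueloUD/laberinto | lab.py | comprobarCamino
-- ===== SOURCE A (Python) =====
-- def comprobarCamino(camino, crdn):
--     if(len(camino)>0):
--         if camino[0] == crdn:
--             return True
--         else:
--             return comprobarCamino(camino[1:len(camino)], crdn)
--     else:
--         return False
-- ===== SOURCE B (Python) =====
-- def comprobarCamino(camino, crdn):
--     for x in camino:
--         if x == crdn:
--             return True
--     return False
-- ===== Notes on version B (the rewrite author's own statement) =====
-- stated objective: faster
-- what changed: Replaced the slice-copying head/tail recursion with a single iterative forward loop over the list, returning True on the first match.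
import Mathlib
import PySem

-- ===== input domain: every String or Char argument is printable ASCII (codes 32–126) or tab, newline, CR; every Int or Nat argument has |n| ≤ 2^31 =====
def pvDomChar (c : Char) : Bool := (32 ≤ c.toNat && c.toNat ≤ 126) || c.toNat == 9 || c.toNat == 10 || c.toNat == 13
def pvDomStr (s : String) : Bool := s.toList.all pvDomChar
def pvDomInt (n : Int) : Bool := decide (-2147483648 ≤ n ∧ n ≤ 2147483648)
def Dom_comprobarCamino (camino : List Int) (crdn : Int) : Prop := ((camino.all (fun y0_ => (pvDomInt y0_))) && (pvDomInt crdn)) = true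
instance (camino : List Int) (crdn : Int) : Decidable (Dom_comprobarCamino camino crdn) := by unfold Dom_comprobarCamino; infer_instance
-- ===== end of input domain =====

-- B replaces A's slice-building recursion with an iterative forward loop (idiomatic; same first-match result).

-- ===== PORT A =====
-- A: if len>0 then compare head, else recurse on the slice camino[1:len(camino)]
def comprobarCamino (camino : List Int) (crdn : Int) : Bool :=
  if camino.length > 0 then
    if PySem.List.pyGetD camino 0 0 == crdn then
      true
    else
      comprobarCamino (PySem.List.slice camino (some 1) (some (camino.length : Int))) crdn
  else
    false
termination_by camino.length
decreasing_by
  simp [PySem.List.slice, PySem.List.clampIdx]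
  omega

-- ===== PORT B =====
-- B: iterative scan, modelled as a fold over the remaining elements with an early-result accumulator
def comprobarCamino_alt (camino : List Int) (crdn : Int) : Bool :=
  camino.foldl (fun acc x => acc || (x == crdn)) false

-- ===== PRECONDITION & SPEC =====
def Spec_comprobarCamino (camino : List Int) (crdn : Int) (out : Bool) : Prop := out = comprobarCamino_alt camino crdn
instance (camino : List Int) (crdn : Int) (out : Bool) : Decidable (Spec_comprobarCamino camino crdn out) := by unfold Spec_comprobarCamino; infer_instance

-- ===== CLAIM (what is proved, stated in full; the proofs are below) =====
def Claim_equal_comprobarCamino : Prop := ∀ (camino : List Int) (crdn : Int), Dom_comprobarCamino camino crdn → Spec_comprobarCamino camino crdn (comprobarCamino camino crdn)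

-- ===== LEMMAS AND PROOFS =====

theorem foldl_or_acc (l : List Int) (crdn : Int) (a : Bool) :
    l.foldl (fun acc x => acc || (x == crdn)) a = (a || l.foldl (fun acc x => acc || (x == crdn)) false) := by
  induction l generalizing a with
  | nil => simp [List.foldl]
  | cons h t ih =>
    simp only [List.foldl]
    rw [ih, ih (false || (h == crdn))]
    cases a <;> simp

theorem alt_cons (h : Int) (t : List Int) (crdn : Int) :
    comprobarCamino_alt (h :: t) crdn = ((h == crdn) || comprobarCamino_alt t crdn) := by
  unfold comprobarCamino_alt
  simp only [List.foldl]
  rw [foldl_or_acc]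
  simp

theorem slice_tail (h : Int) (t : List Int) :
    PySem.List.slice (h :: t) (some 1) (some ((t.length : Int) + 1)) = t := by
  have := PySem.List.slice_natCast (h :: t) 1 (t.length + 1)
  push_cast at this
  simpa using this

theorem ports_agree (camino : List Int) (crdn : Int) :
    comprobarCamino camino crdn = comprobarCamino_alt camino crdn := by
  induction camino with
  | nil => unfold comprobarCamino comprobarCamino_alt; simp
  | cons h t ih =>
    unfold comprobarCamino
    rw [alt_cons]
    simp only [List.length_cons]
    push_cast
    rw [slice_tail]
    by_cases hc : h = crdn
    · simp [hc, PySem.List.pyGetD, PySem.List.pyGet?, PySem.List.pyIdx?]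
    · simp [hc, PySem.List.pyGetD, PySem.List.pyGet?, PySem.List.pyIdx?, ih]

-- ===== VERDICT (by name: the statement is the Claim_ definition above) =====
theorem comprobarCamino_spec : Claim_equal_comprobarCamino := by
  intro camino crdn _
  exact ports_agree camino crdn
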